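-- pv_equiv track=rewrite | github.com/YiJia-Zhu/Steer-Memory-114 | esm/offline/stage1.py | _delimiter_end_offsets
-- ===== SOURCE A (Python) =====
-- def _delimiter_end_offsets(text: str, delimiter: str) -> list[int]:
--     """
--     Return character offsets (end-exclusive) of each delimiter occurrence in text.
--     """
--     out: list[int] = []
--     start = 0
--     while True:
--         idx = text.find(delimiter, start)
--         if idx < 0:
--             break
--         end = idx + len(delimiter)
--         out.append(int(end))
--         start = end
--     return out
-- ===== SOURCE B (Python) =====
-- def _delimiter_end_offsets(text: str, delimiter: str) -> list[int]:
--     parts = text.split(delimiter)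
--     out: list[int] = []
--     pos = 0
--     for part in parts[:-1]:
--         pos += len(part) + len(delimiter)
--         out.append(pos)
--     return out
-- ===== Notes on version B (the rewrite author's own statement) =====
-- stated objective: simpler
-- what changed: Replaces the explicit find-cursor while-loop with a single text.split(delimiter) followed by a running prefix sum of part lengths over all parts but the last.
import Mathlib
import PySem

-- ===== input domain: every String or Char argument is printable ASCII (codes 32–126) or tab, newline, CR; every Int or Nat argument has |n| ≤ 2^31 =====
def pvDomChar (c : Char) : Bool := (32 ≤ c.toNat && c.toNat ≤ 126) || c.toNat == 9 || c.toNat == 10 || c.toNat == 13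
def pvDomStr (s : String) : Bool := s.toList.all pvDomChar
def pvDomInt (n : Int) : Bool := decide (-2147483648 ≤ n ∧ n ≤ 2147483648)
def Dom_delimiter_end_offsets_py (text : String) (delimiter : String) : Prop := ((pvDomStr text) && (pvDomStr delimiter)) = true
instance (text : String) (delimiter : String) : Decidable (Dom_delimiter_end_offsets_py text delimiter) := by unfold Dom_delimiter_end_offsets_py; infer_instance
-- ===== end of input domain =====

-- B replaces A's find-cursor while-loop by one text.split(delimiter) plus a running
-- prefix sum of part lengths over all parts but the last (objective: simpler).


-- ===== PORT A =====
-- A's `while True` loop; the fuel argument only makes it total in Lean: when the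
-- delimiter is nonempty (Pre_), t.length + 1 iterations always suffice (start strictly
-- increases and stays ≤ t.length while the loop continues).
def pvLoopA (t d : List Char) : Nat → Int → List Int → List Int
  | 0, _, out => out
  | fuel + 1, start, out =>
    let idx := PySem.Chars.findFrom t d start none
    if idx < 0 then out
    else pvLoopA t d fuel (idx + (d.length : Int)) (out ++ [idx + (d.length : Int)])

def delimiter_end_offsets_py (text : String) (delimiter : String) : List Int :=
  pvLoopA text.toList delimiter.toList (text.toList.length + 1) 0 []

-- ===== PORT B =====
-- parts[:-1] is List.dropLast (Python's xs[:-1] for every list, including []).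
def delimiter_end_offsets_py_alt (text : String) (delimiter : String) : List Int :=
  match PySem.Str.split? text delimiter with
  | none => []   -- Python raises ValueError here (empty separator); excluded by Pre_
  | some parts =>
    (parts.dropLast.foldl
      (fun (st : List Int × Int) part =>
        let pos := st.2 + PySem.Str.len part + PySem.Str.len delimiter
        (st.1 ++ [pos], pos))
      ([], 0)).1

-- ===== PRECONDITION & SPEC =====
-- Pre_ excludes delimiter == "" only: there A never returns (its find always succeeds
-- at the cursor and the cursor never advances, an infinite loop), and B's str.split
-- raises ValueError.
def Pre_delimiter_end_offsets_py (text : String) (delimiter : String) : Prop :=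
  delimiter.toList ≠ []
instance (text : String) (delimiter : String) : Decidable (Pre_delimiter_end_offsets_py text delimiter) := by unfold Pre_delimiter_end_offsets_py; infer_instance

def pvWitness_delimiter_end_offsets_py : String × String := ("a,bb,,c", ",")

def Spec_delimiter_end_offsets_py (text : String) (delimiter : String) (out : List Int) : Prop := out = delimiter_end_offsets_py_alt text delimiter
instance (text : String) (delimiter : String) (out : List Int) : Decidable (Spec_delimiter_end_offsets_py text delimiter out) := by unfold Spec_delimiter_end_offsets_py; infer_instance

-- ===== CLAIM (what is proved, stated in full; the proofs are below) =====
def Claim_equal_delimiter_end_offsets_py : Prop := ∀ (text : String) (delimiter : String), Dom_delimiter_end_offsets_py text delimiter → Pre_delimiter_end_offsets_py text delimiter → Spec_delimiter_end_offsets_py text delimiter (delimiter_end_offsets_py text delimiter)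

-- ===== LEMMAS AND PROOFS =====

-- Clean reference value both ports are reduced to: the end offsets of the successive
-- non-overlapping matches of d in l, each shifted into absolute position.
def pvEnds (d l : List Char) : List Int :=
  let i := PySem.Chars.find l d
  if h : 0 ≤ i ∧ d ≠ [] then
    let e := i.toNat + d.length
    (e : Int) :: (pvEnds d (l.drop e)).map (· + (e : Int))
  else []
termination_by l.length
decreasing_by
  have hinf : d <:+: l := (PySem.Chars.find_nonneg_iff l d).mp h.1
  have hl : 0 < l.length := List.length_pos_iff.mpr (by
    rintro rfl
    exact h.2 (List.eq_nil_of_infix_nil hinf))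
  have hd1 : 1 ≤ d.length := List.length_pos_iff.mpr h.2
  simp only [List.length_drop]
  omega

lemma pvFind_go_shift (d l : List Char) (hd : d ≠ []) : ∀ k : Nat,
    PySem.Chars.find.go d l k =
      if PySem.Chars.find l d = -1 then -1 else PySem.Chars.find l d + k := by
  induction l with
  | nil =>
    intro k
    simp [PySem.Chars.find, PySem.Chars.find.go, List.isEmpty_iff, hd]
  | cons c rest ih =>
    intro k
    by_cases hp : d.isPrefixOf (c :: rest)
    · simp [PySem.Chars.find, PySem.Chars.find.go, hp]
    · have h0 := ih 1
      have hk := ih (k + 1)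
      have hb := PySem.Chars.neg_one_le_find rest d
      simp only [PySem.Chars.find, PySem.Chars.find.go, hp] at *
      rw [hk, h0]
      by_cases hm : PySem.Chars.find.go d rest 0 = -1
      · simp [hm]
      · simp only [hm, if_false]
        split_ifs <;> omega

lemma pvFind_cons (d : List Char) (hd : d ≠ []) (c : Char) (rest : List Char)
    (hp : ¬ d.isPrefixOf (c :: rest)) :
    PySem.Chars.find (c :: rest) d =
      if PySem.Chars.find rest d = -1 then -1 else PySem.Chars.find rest d + 1 := by
  conv_lhs => rw [PySem.Chars.find, PySem.Chars.find.go]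
  simp only [hp]
  exact pvFind_go_shift d rest hd 1

-- splitOn's worker characterised by find.
lemma pvSplitOn_go_spec (d : List Char) (hd : d ≠ []) : ∀ n l, l.length ≤ n →
    ∀ fuel, l.length < fuel → ∀ (cur : List Char) (acc : List (List Char)),
    PySem.Chars.splitOn.go d fuel l cur acc =
      acc.reverse ++
        (if PySem.Chars.find l d = -1 then [cur.reverse ++ l]
         else (cur.reverse ++ l.take (PySem.Chars.find l d).toNat) ::
              PySem.Chars.splitOn (l.drop ((PySem.Chars.find l d).toNat + d.length)) d) := by
  intro n
  induction n with
  | zero =>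
    intro l hl fuel hf cur acc
    have hl0 : l = [] := List.eq_nil_of_length_eq_zero (by omega)
    subst hl0
    obtain ⟨m, rfl⟩ : ∃ m, fuel = m + 1 := ⟨fuel - 1, by omega⟩
    rw [PySem.Chars.splitOn.go]
    · simp [PySem.Chars.find, PySem.Chars.find.go, List.isEmpty_iff, hd]
    · exact Nat.succ_ne_zero m
  | succ n ih =>
    intro l hl fuel hf cur acc
    obtain ⟨m, rfl⟩ : ∃ m, fuel = m + 1 := ⟨fuel - 1, by omega⟩
    match l with
    | [] =>
      rw [PySem.Chars.splitOn.go]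
      · simp [PySem.Chars.find, PySem.Chars.find.go, List.isEmpty_iff, hd]
      · exact Nat.succ_ne_zero m
    | c :: rest =>
      rw [PySem.Chars.splitOn.go]
      by_cases hp : d.isPrefixOf (c :: rest)
      · simp only [hp, if_true]
        have hfind : PySem.Chars.find (c :: rest) d = 0 := by
          rw [PySem.Chars.find, PySem.Chars.find.go]; simp [hp]
        have hd1 : 1 ≤ d.length := List.length_pos_iff.mpr hd
        have hlen : (List.drop d.length (c :: rest)).length ≤ n := by
          simp only [List.length_drop, List.length_cons] at *
          omega
        have hfuel : (List.drop d.length (c :: rest)).length < m := by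
          simp only [List.length_drop, List.length_cons] at *
          omega
        have hS : PySem.Chars.splitOn (List.drop d.length (c :: rest)) d =
            (if PySem.Chars.find (List.drop d.length (c :: rest)) d = -1
             then [List.drop d.length (c :: rest)]
             else (List.take (PySem.Chars.find (List.drop d.length (c :: rest)) d).toNat
                     (List.drop d.length (c :: rest))) ::
                  PySem.Chars.splitOn
                    (List.drop ((PySem.Chars.find (List.drop d.length (c :: rest)) d).toNat + d.length)
                      (List.drop d.length (c :: rest))) d) := by
          rw [PySem.Chars.splitOn,
            ih _ hlen ((List.drop d.length (c :: rest)).length + 1) (by omega) [] []]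
          simp
        rw [ih _ hlen m hfuel [] (cur.reverse :: acc)]
        simp only [hfind, Int.toNat_zero, Nat.zero_add]
        conv_rhs => rw [hS]
        split_ifs <;> simp_all
      · simp only [hp]
        have hlen : rest.length ≤ n := by simp at hl; omega
        have hfuel : rest.length < m := by simp at hf; omega
        rw [ih rest hlen m hfuel (c :: cur) acc]
        rw [pvFind_cons d hd c rest hp]
        by_cases hm : PySem.Chars.find rest d = -1
        · simp [hm]
        · have hge : 0 ≤ PySem.Chars.find rest d := by
            have := PySem.Chars.neg_one_le_find rest d
            omega
          simp only [hm, if_false]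
          have hne : ¬ (PySem.Chars.find rest d + 1 = -1) := by omega
          simp only [hne, if_false]
          have ht : (PySem.Chars.find rest d + 1).toNat = (PySem.Chars.find rest d).toNat + 1 := by
            omega
          have hdrop : List.drop ((PySem.Chars.find rest d).toNat + 1 + d.length) (c :: rest)
              = List.drop ((PySem.Chars.find rest d).toNat + d.length) rest := by
            simp [List.drop_succ_cons, Nat.add_right_comm]
          rw [ht, hdrop]
          simp [List.take_succ_cons]

lemma pvSplitOn_eq_find (d l : List Char) (hd : d ≠ []) :
    PySem.Chars.splitOn l d =
      if PySem.Chars.find l d = -1 then [l]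
      else l.take (PySem.Chars.find l d).toNat ::
           PySem.Chars.splitOn (l.drop ((PySem.Chars.find l d).toNat + d.length)) d := by
  rw [PySem.Chars.splitOn,
    pvSplitOn_go_spec d hd l.length l le_rfl (l.length + 1) (by omega) [] []]
  simp

-- i + |d| ≤ |l| at a successful find.
lemma pvFind_add_len_le (d l : List Char) (h : 0 ≤ PySem.Chars.find l d) :
    (PySem.Chars.find l d).toNat + d.length ≤ l.length := by
  have hpre := (PySem.Chars.find_spec h).1
  have := List.IsPrefix.length_le hpre
  have hle := PySem.Chars.find_le_length l d
  simp only [List.length_drop] at this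
  omega

-- B's fold over the split, reduced to pvEnds.
lemma pvB_fold (d : List Char) (hd : d ≠ []) : ∀ n l, l.length ≤ n →
    ∀ (out : List Int) (pos : Int),
    ((PySem.Chars.splitOn l d).map String.ofList).dropLast.foldl
      (fun (st : List Int × Int) part =>
        (st.1 ++ [st.2 + PySem.Str.len part + (d.length : Int)],
         st.2 + PySem.Str.len part + (d.length : Int)))
      (out, pos)
    = (out ++ (pvEnds d l).map (· + pos),
       pos + ((pvEnds d l).getLast?.getD 0)) := by
  intro n
  induction n with
  | zero =>
    intro l hl out pos
    have : l = [] := List.eq_nil_of_length_eq_zero (by omega)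
    subst this
    rw [pvSplitOn_eq_find d [] hd]
    have : PySem.Chars.find [] d = -1 := by
      simp [PySem.Chars.find, PySem.Chars.find.go, List.isEmpty_iff, hd]
    rw [pvEnds]
    simp [this]
  | succ n ih =>
    intro l hl out pos
    rw [pvSplitOn_eq_find d l hd]
    by_cases hm : PySem.Chars.find l d = -1
    · have hng : ¬ (0 ≤ PySem.Chars.find l d ∧ d ≠ []) := by
        intro h; omega
      rw [pvEnds]
      simp [hm]
    · have hge : 0 ≤ PySem.Chars.find l d := by
        have := PySem.Chars.neg_one_le_find l d
        omega
      have hg : 0 ≤ PySem.Chars.find l d ∧ d ≠ [] := ⟨hge, hd⟩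
      simp only [hm, if_false]
      set i := (PySem.Chars.find l d).toNat with hi
      set e := i + d.length with he
      have hEnds : pvEnds d l = (e : Int) :: (pvEnds d (l.drop e)).map (· + (e : Int)) := by
        rw [pvEnds, dif_pos hg]
      rw [hEnds]
      have hd1 : 1 ≤ d.length := List.length_pos_iff.mpr hd
      have hle : e ≤ l.length := pvFind_add_len_le d l hge
      have he1 : 1 ≤ e := by rw [he]; omega
      have hlen : (l.drop e).length ≤ n := by
        simp only [List.length_drop]
        omega
      have hrest_ne : (PySem.Chars.splitOn (l.drop e) d).map String.ofList ≠ [] := by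
        rw [pvSplitOn_eq_find d (l.drop e) hd]
        split_ifs <;> simp
      rw [List.map_cons, List.dropLast_cons_of_ne_nil hrest_ne, List.foldl_cons]
      have hlentake : PySem.Str.len (String.ofList (l.take i)) = (i : Int) := by
        rw [PySem.Str.len_eq]
        simp only [String.toList_ofList, List.length_take]
        congr 1
        omega
      rw [ih (l.drop e) hlen (out ++ [pos + PySem.Str.len (String.ofList (l.take i)) + (d.length : Int)]) _]
      rw [hlentake]
      have hpe : pos + (i : Int) + (d.length : Int) = (e : Int) + pos := by
        push_cast [he]
        ring
      rw [hpe, Prod.mk.injEq]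
      refine ⟨?_, ?_⟩
      · simp only [List.map_map, List.map_cons, List.append_assoc, List.singleton_append]
        congr 1
        congr 1
        apply List.map_congr_left
        intro x _
        simp only [Function.comp_apply]
        ring
      · rcases hlast : (pvEnds d (l.drop e)).getLast? with _ | v
        · have hnil : pvEnds d (l.drop e) = [] := by
            exact List.getLast?_eq_none_iff.mp hlast
          rw [List.getLast?_cons]
          simp [hnil]
          ring
        · rw [List.getLast?_cons]
          simp [List.getLast?_map, hlast]
          ring

-- A's loop, reduced to pvEnds.
lemma pvA_loop (t d : List Char) (hd : d ≠ []) : ∀ fuel (s : Nat) (out : List Int),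
    t.length - s < fuel → s ≤ t.length →
    pvLoopA t d fuel (s : Int) out =
      out ++ (pvEnds d (t.drop s)).map (· + (s : Int)) := by
  intro fuel
  induction fuel with
  | zero => intro s out h1 _; omega
  | succ fuel ih =>
    intro s out h1 h2
    rw [pvLoopA]
    rw [PySem.Chars.findFrom_natCast t d s h2]
    by_cases hm : PySem.Chars.find (t.drop s) d = -1
    · have hng : ¬ (0 ≤ PySem.Chars.find (t.drop s) d ∧ d ≠ []) := by
        intro h; omega
      rw [pvEnds]
      simp [hm]
    · have hge : 0 ≤ PySem.Chars.find (t.drop s) d := by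
        have := PySem.Chars.neg_one_le_find (t.drop s) d
        omega
      simp only [hm, if_false]
      set i := (PySem.Chars.find (t.drop s) d).toNat with hi
      have hieq : PySem.Chars.find (t.drop s) d = (i : Int) := by omega
      have hd1 : 1 ≤ d.length := List.length_pos_iff.mpr hd
      have hle : i + d.length ≤ (t.drop s).length := pvFind_add_len_le d (t.drop s) hge
      simp only [List.length_drop] at hle
      have hnotlt : ¬ ((s : Int) + PySem.Chars.find (t.drop s) d < 0) := by omega
      rw [if_neg hnotlt]
      have harg : (s : Int) + PySem.Chars.find (t.drop s) d + (d.length : Int)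
          = ((s + i + d.length : Nat) : Int) := by
        rw [hieq]; push_cast; ring
      rw [harg]
      rw [ih (s + i + d.length) _ (by omega) (by omega)]
      have hg : 0 ≤ PySem.Chars.find (t.drop s) d ∧ d ≠ [] := ⟨hge, hd⟩
      have hEnds : pvEnds d (t.drop s) =
          ((i + d.length : Nat) : Int) ::
            (pvEnds d ((t.drop s).drop (i + d.length))).map (· + ((i + d.length : Nat) : Int)) := by
        rw [pvEnds, dif_pos hg]
      rw [hEnds, List.drop_drop]
      simp only [List.map_cons, List.map_map, List.append_assoc, List.singleton_append]
      congr 1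
      rw [Nat.add_assoc]
      congr 1
      · push_cast; ring
      · apply List.map_congr_left
        intro x _
        simp only [Function.comp_apply]
        push_cast
        ring

-- ===== VERDICT (by name: the statement is the Claim_ definition above) =====
theorem delimiter_end_offsets_py_spec : Claim_equal_delimiter_end_offsets_py := by
  intro text delimiter _ hpre
  have hpre' : delimiter.toList ≠ [] := hpre
  unfold Spec_delimiter_end_offsets_py
  unfold delimiter_end_offsets_py delimiter_end_offsets_py_alt
  rw [PySem.Str.split?, PySem.Chars.split?]
  simp only [List.isEmpty_iff, hpre', if_false, Option.map_some]
  have hA := pvA_loop text.toList delimiter.toList hpre' (text.toList.length + 1) 0 []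
    (by omega) (by omega)
  simp only [Nat.cast_zero, List.drop_zero] at hA
  have hB := pvB_fold delimiter.toList hpre' text.toList.length text.toList le_rfl [] 0
  simp only [PySem.Str.len_eq] at hB ⊢
  rw [hA, hB]
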